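-- pv_equiv track=rewrite | github.com/Rajashekarredde/Codes | array/asana.py | removeOneDigit
-- ===== SOURCE A (Python) =====
-- def removeOneDigit(s,t):
--     ##Take a variable, total_count, it's initial value is 0
--     total_count=0
--     ##Start a for loop, to traverse s string from left to right
--     for i in range(len(s)):
--         ##If current character is in range from '0' to '9' then,
--         if '0'<=s[i]<='9':
--             ##Create a string from s, excluding current character
--             temp=s[:i]+s[i+1:]
--             ##If this new string is less than t then increment total_count by 1
--             if temp<t:
--                 total_count+=1
--     ##Start a for loop, to traverse t string from left to right
--     for i in range(len(t)):
--         ##If current character is in range from '0' to '9' then,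
--         if '0'<=t[i]<='9':
--             ##Create a string from t, excluding current character
--             temp=t[:i]+t[i+1:]
--             ##If this new string is greater than s then increment total_count by 1
--             if s<temp:
--                 total_count+=1
--     ##Now,return the value stored in total_count variable
--     return total_count
-- ===== SOURCE B (Python) =====
-- def _cmp3(x, y):
--     # three-way compare of "optional" characters (None = past the end)
--     if x is None and y is None:
--         return 0
--     if x is None:
--         return -1
--     if y is None:
--         return 1
--     if x < y:
--         return -1
--     if y < x:
--         return 1
--     return 0
--
--
-- def removeOneDigit(s, t):
--     n, m = len(s), len(t)
--     # D[j] = three-way compare of s[j+1:] vs t[j:], filled right to left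
--     D = [0] * (n + 1)
--     for j in range(n - 1, -1, -1):
--         c = _cmp3(s[j + 1] if j + 1 < n else None, t[j] if j < m else None)
--         D[j] = c if c != 0 else D[j + 1]
--     # E[i] = three-way compare of s[i:] vs t[i+1:], filled right to left
--     E = [0] * (m + 1)
--     for i in range(m - 1, -1, -1):
--         c = _cmp3(s[i] if i < n else None, t[i + 1] if i + 1 < m else None)
--         E[i] = c if c != 0 else E[i + 1]
--     total = 0
--     pref = 0  # three-way compare of s[:i] vs t[:i], maintained incrementally
--     for i in range(max(n, m)):
--         if i < n and '0' <= s[i] <= '9':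
--             r = pref if pref != 0 else D[i]
--             if r < 0:          # s with s[i] deleted  <  t
--                 total += 1
--         if i < m and '0' <= t[i] <= '9':
--             r = pref if pref != 0 else E[i]
--             if r < 0:          # s  <  t with t[i] deleted
--                 total += 1
--         if pref == 0:
--             pref = _cmp3(s[i] if i < n else None, t[i] if i < m else None)
--     return total
-- ===== Notes on version B (the rewrite author's own statement) =====
-- stated objective: alternative
-- what changed: Instead of rebuilding and lexicographically comparing every digit-deleted string, B precomputes two right-to-left suffix-comparison tables (D[j]=cmp(s[j+1:],t[j:]), E[i]=cmp(s[i:],t[i+1:])) and makes one left-to-right scan maintaining the prefix comparison, resolving each deletion's test from those tables; this is linear-time in Python-level steps but was not measured faster than A's C-speed slicing.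
import Mathlib
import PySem

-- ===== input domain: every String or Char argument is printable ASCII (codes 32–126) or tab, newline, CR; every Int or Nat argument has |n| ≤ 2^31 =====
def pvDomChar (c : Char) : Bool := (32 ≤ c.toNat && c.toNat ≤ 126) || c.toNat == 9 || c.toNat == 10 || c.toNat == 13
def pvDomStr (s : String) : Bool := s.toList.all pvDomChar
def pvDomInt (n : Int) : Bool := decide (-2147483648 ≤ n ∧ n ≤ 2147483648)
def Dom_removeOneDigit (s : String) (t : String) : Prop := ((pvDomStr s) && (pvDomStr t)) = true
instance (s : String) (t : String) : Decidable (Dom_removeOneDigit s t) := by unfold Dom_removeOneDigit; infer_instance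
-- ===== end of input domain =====

-- B replaces A's rebuild-and-compare of every digit-deleted string by two right-to-left
-- suffix-comparison tables plus one left-to-right prefix scan (objective: alternative).

-- ===== PORT A =====
-- literal port of Source A: for each digit of s (then of t) build the deleted string with slices
-- and compare it lexicographically with the other string.
def removeOneDigit (s : String) (t : String) : Int :=
  let s' := s.toList
  let t' := t.toList
  let c1 := (PySem.List.pyRange 0 (PySem.List.len s')).foldl (fun acc i =>
      if '0' ≤ PySem.List.pyGetD s' i ' ' ∧ PySem.List.pyGetD s' i ' ' ≤ '9' then
        (if PySem.List.slice s' none (some i) ++ PySem.List.slice s' (some (i+1)) none < t'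
         then acc + 1 else acc)
      else acc) 0
  (PySem.List.pyRange 0 (PySem.List.len t')).foldl (fun acc i =>
      if '0' ≤ PySem.List.pyGetD t' i ' ' ∧ PySem.List.pyGetD t' i ' ' ≤ '9' then
        (if s' < PySem.List.slice t' none (some i) ++ PySem.List.slice t' (some (i+1)) none
         then acc + 1 else acc)
      else acc) c1

-- ===== PORT B =====
-- port of Source B: `_cmp3`
def pvCmp3 (x y : Option Char) : Int :=
  match x, y with
  | none, none => 0
  | none, some _ => -1
  | some _, none => 1
  | some a, some b => if a < b then -1 else if b < a then 1 else 0

-- Source B's array D filled right-to-left, rendered as the recurrence D[j] = c if c≠0 else D[j+1]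
-- (the Python array memoises exactly this recursion; entries past the fill are 0)
def pvD (s t : List Char) (j : Nat) : Int :=
  if _h : j < s.length then
    let c := pvCmp3 s[j+1]? t[j]?
    if c ≠ 0 then c else pvD s t (j+1)
  else 0
termination_by s.length - j

-- Source B's array E, same rendering
def pvE (s t : List Char) (i : Nat) : Int :=
  if _h : i < t.length then
    let c := pvCmp3 s[i]? t[i+1]?
    if c ≠ 0 then c else pvE s t (i+1)
  else 0
termination_by t.length - i

-- Source B's final loop: one pass maintaining pref = cmp(s[:i], t[:i])
def pvScan (s t : List Char) (i : Nat) (pref total : Int) : Int :=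
  if _h : i < max s.length t.length then
    let tot1 := if hs : i < s.length then
        (if '0' ≤ s[i] ∧ s[i] ≤ '9' then
          (if (if pref ≠ 0 then pref else pvD s t i) < 0 then total + 1 else total)
         else total)
      else total
    let tot2 := if ht : i < t.length then
        (if '0' ≤ t[i] ∧ t[i] ≤ '9' then
          (if (if pref ≠ 0 then pref else pvE s t i) < 0 then tot1 + 1 else tot1)
         else tot1)
      else tot1
    pvScan s t (i+1) (if pref = 0 then pvCmp3 s[i]? t[i]? else pref) tot2
  else total
termination_by max s.length t.length - i

def removeOneDigit_alt (s : String) (t : String) : Int :=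
  pvScan s.toList t.toList 0 0 0

-- ===== PRECONDITION & SPEC =====
def Spec_removeOneDigit (s : String) (t : String) (out : Int) : Prop := out = removeOneDigit_alt s t
instance (s : String) (t : String) (out : Int) : Decidable (Spec_removeOneDigit s t out) := by unfold Spec_removeOneDigit; infer_instance

-- ===== CLAIM (what is proved, stated in full; the proofs are below) =====
def Claim_equal_removeOneDigit : Prop := ∀ (s : String) (t : String), Dom_removeOneDigit s t → Spec_removeOneDigit s t (removeOneDigit s t)

-- ===== LEMMAS AND PROOFS =====

-- proof-only three-way lexicographic comparison of char lists
def pvCmpL : List Char → List Char → Int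
  | [], [] => 0
  | [], _ :: _ => -1
  | _ :: _, [] => 1
  | a :: as, b :: bs => if a < b then -1 else if b < a then 1 else pvCmpL as bs

theorem pvCmpL_cases (x y : List Char) : pvCmpL x y = -1 ∨ pvCmpL x y = 0 ∨ pvCmpL x y = 1 := by
  induction x generalizing y with
  | nil => cases y <;> simp [pvCmpL]
  | cons a as ih =>
    cases y with
    | nil => simp [pvCmpL]
    | cons b bs =>
      simp only [pvCmpL]
      split_ifs <;> simp [ih]

theorem pvCmpL_lt_iff (x y : List Char) : x < y ↔ pvCmpL x y = -1 := by
  induction x generalizing y with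
  | nil =>
    cases y with
    | nil => simp [pvCmpL, List.not_lt_nil]
    | cons b bs => simp [pvCmpL, List.nil_lt_cons]
  | cons a as ih =>
    cases y with
    | nil => simp [pvCmpL, List.not_lt_nil]
    | cons b bs =>
      rw [List.cons_lt_cons_iff]
      simp only [pvCmpL]
      rcases lt_trichotomy a b with h | h | h
      · simp [h, not_lt_of_gt h]
      · subst h; simp [lt_irrefl, ih]
      · simp [h, not_lt_of_gt h, ne_of_gt h]

-- decomposing a comparison whose LEFT side is an append
theorem pvCmpL_append_left (a b c : List Char) :
    pvCmpL (a ++ b) c =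
      if pvCmpL a (c.take a.length) ≠ 0 then pvCmpL a (c.take a.length)
      else pvCmpL b (c.drop a.length) := by
  induction a generalizing c with
  | nil => simp [pvCmpL]
  | cons x xs ih =>
    cases c with
    | nil =>
      simp [pvCmpL]
    | cons y ys =>
      simp only [List.cons_append, List.length_cons, List.take_succ_cons, List.drop_succ_cons,
        pvCmpL]
      split_ifs with h1 h2 <;> simp_all [ih]

-- decomposing a comparison whose RIGHT side is an append
theorem pvCmpL_append_right (a b c : List Char) :
    pvCmpL c (a ++ b) =
      if pvCmpL (c.take a.length) a ≠ 0 then pvCmpL (c.take a.length) a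
      else pvCmpL (c.drop a.length) b := by
  induction a generalizing c with
  | nil => simp [pvCmpL]
  | cons x xs ih =>
    cases c with
    | nil =>
      simp [pvCmpL]
    | cons y ys =>
      simp only [List.cons_append, List.length_cons, List.take_succ_cons, List.drop_succ_cons,
        pvCmpL]
      split_ifs with h1 h2 <;> simp_all [ih]

-- one step of a suffix comparison, in terms of the optional heads
theorem pvCmpL_drop_step (s t : List Char) (a b : Nat) :
    pvCmpL (s.drop a) (t.drop b) =
      if pvCmp3 s[a]? t[b]? ≠ 0 then pvCmp3 s[a]? t[b]?
      else pvCmpL (s.drop (a+1)) (t.drop (b+1)) := by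
  by_cases ha : a < s.length <;> by_cases hb : b < t.length
  · rw [List.drop_eq_getElem_cons ha, List.drop_eq_getElem_cons hb]
    simp only [List.getElem?_eq_getElem ha, List.getElem?_eq_getElem hb, pvCmp3, pvCmpL]
    split_ifs <;> simp_all
  · rw [List.drop_eq_getElem_cons ha, List.drop_eq_nil_of_le (by omega : t.length ≤ b),
      List.drop_eq_nil_of_le (by omega : t.length ≤ b + 1)]
    simp [List.getElem?_eq_getElem ha, List.getElem?_eq_none (by omega : t.length ≤ b), pvCmp3, pvCmpL]
  · rw [List.drop_eq_getElem_cons hb, List.drop_eq_nil_of_le (by omega : s.length ≤ a),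
      List.drop_eq_nil_of_le (by omega : s.length ≤ a + 1)]
    simp [List.getElem?_eq_getElem hb, List.getElem?_eq_none (by omega : s.length ≤ a), pvCmp3, pvCmpL]
  · rw [List.drop_eq_nil_of_le (by omega : s.length ≤ a), List.drop_eq_nil_of_le (by omega : t.length ≤ b),
      List.drop_eq_nil_of_le (by omega : s.length ≤ a + 1), List.drop_eq_nil_of_le (by omega : t.length ≤ b + 1)]
    simp [List.getElem?_eq_none (by omega : s.length ≤ a), List.getElem?_eq_none (by omega : t.length ≤ b),
      pvCmp3, pvCmpL]

-- one step of the prefix comparison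
theorem pvCmpL_take_succ (i : Nat) (s t : List Char) :
    pvCmpL (s.take (i+1)) (t.take (i+1)) =
      if pvCmpL (s.take i) (t.take i) = 0 then pvCmp3 s[i]? t[i]?
      else pvCmpL (s.take i) (t.take i) := by
  induction i generalizing s t with
  | zero =>
    cases s <;> cases t <;> simp [pvCmpL, pvCmp3] <;> split_ifs <;> simp_all [pvCmpL]
  | succ k ih =>
    cases s with
    | nil =>
      cases t with
      | nil => simp [pvCmpL, pvCmp3]
      | cons b bs => simp [pvCmpL, pvCmp3]
    | cons a as =>
      cases t with
      | nil => simp [pvCmpL, pvCmp3]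
      | cons b bs =>
        simp only [List.take_succ_cons, pvCmpL, List.getElem?_cons_succ]
        split_ifs <;> simp_all [ih]

-- pvD computes the suffix comparison cmp(s[j+1:], t[j:]) wherever Source B reads it
theorem pvD_spec (s t : List Char) : ∀ k j, s.length - j ≤ k →
    (j < s.length ∨ t.length ≤ j) → pvD s t j = pvCmpL (s.drop (j+1)) (t.drop j) := by
  intro k
  induction k with
  | zero =>
    intro j hk hj
    have hn : s.length ≤ j := by omega
    have hm : t.length ≤ j := by rcases hj with h | h; omega; exact h
    rw [pvD]
    simp [Nat.not_lt_of_le hn, List.drop_eq_nil_of_le (by omega : s.length ≤ j + 1),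
      List.drop_eq_nil_of_le hm, pvCmpL]
  | succ k ih =>
    intro j hk hj
    by_cases hn : j < s.length
    · rw [pvD]
      simp only [hn, dif_pos]
      rw [pvCmpL_drop_step]
      split_ifs with hc
      · rfl
      · -- head comparison is 0: either both ends passed, or both chars present and equal
        push_neg at hc
        apply ih (j+1) (by omega)
        rcases h1 : s[j+1]? with _ | x <;> rcases h2 : t[j]? with _ | y
        · right; have := List.getElem?_eq_none_iff.mp h2; omega
        · exfalso; rw [h1, h2] at hc; simp [pvCmp3] at hc
        · exfalso; rw [h1, h2] at hc; simp [pvCmp3] at hc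
        · left; obtain ⟨hlt, -⟩ := List.getElem?_eq_some_iff.mp h1; omega
    · -- past the end of s: same as the base case
      have hm : t.length ≤ j := by rcases hj with h | h; omega; exact h
      rw [pvD]
      simp [hn, List.drop_eq_nil_of_le (by omega : s.length ≤ j + 1),
        List.drop_eq_nil_of_le hm, pvCmpL]

-- pvE computes cmp(s[i:], t[i+1:]) wherever Source B reads it
theorem pvE_spec (s t : List Char) : ∀ k i, t.length - i ≤ k →
    (i < t.length ∨ s.length ≤ i) → pvE s t i = pvCmpL (s.drop i) (t.drop (i+1)) := by
  intro k
  induction k with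
  | zero =>
    intro i hk hi
    have hm : t.length ≤ i := by omega
    have hn : s.length ≤ i := by rcases hi with h | h; omega; exact h
    rw [pvE]
    simp [Nat.not_lt_of_le hm, List.drop_eq_nil_of_le hn,
      List.drop_eq_nil_of_le (by omega : t.length ≤ i + 1), pvCmpL]
  | succ k ih =>
    intro i hk hi
    by_cases hm : i < t.length
    · rw [pvE]
      simp only [hm, dif_pos]
      rw [pvCmpL_drop_step]
      split_ifs with hc
      · rfl
      · push_neg at hc
        apply ih (i+1) (by omega)
        rcases h1 : s[i]? with _ | x <;> rcases h2 : t[i+1]? with _ | y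
        · right; have := List.getElem?_eq_none_iff.mp h1; omega
        · exfalso; rw [h1, h2] at hc; simp [pvCmp3] at hc
        · exfalso; rw [h1, h2] at hc; simp [pvCmp3] at hc
        · left; obtain ⟨hlt, -⟩ := List.getElem?_eq_some_iff.mp h2; omega
    · have hn : s.length ≤ i := by rcases hi with h | h; omega; exact h
      rw [pvE]
      simp [hm, List.drop_eq_nil_of_le hn,
        List.drop_eq_nil_of_le (by omega : t.length ≤ i + 1), pvCmpL]

-- per-index contributions of A's two loops (with total getD access, used only in range)
def pvSStep (s t : List Char) (k : Nat) : Int :=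
  if '0' ≤ s.getD k ' ' ∧ s.getD k ' ' ≤ '9' then
    (if (s.take k ++ s.drop (k+1)) < t then 1 else 0) else 0

def pvTStep (s t : List Char) (k : Nat) : Int :=
  if '0' ≤ t.getD k ' ' ∧ t.getD k ' ' ≤ '9' then
    (if s < (t.take k ++ t.drop (k+1)) then 1 else 0) else 0

-- A's total restated as a tail recursion from index i (proof-only)
def pvAfrom (s t : List Char) (i : Nat) : Int :=
  if i < max s.length t.length then
    (if i < s.length then pvSStep s t i else 0)
    + (if i < t.length then pvTStep s t i else 0)
    + pvAfrom s t (i+1)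
  else 0
termination_by max s.length t.length - i

theorem pvScan_spec (s t : List Char) : ∀ k i pref total, max s.length t.length - i ≤ k →
    pref = pvCmpL (s.take i) (t.take i) →
    pvScan s t i pref total = total + pvAfrom s t i := by
  intro k
  induction k with
  | zero =>
    intro i pref total hk hpref
    have h : ¬ i < max s.length t.length := by omega
    rw [pvScan, pvAfrom]
    simp [h]
  | succ k ih
  =>
    intro i pref total hk hpref
    by_cases h : i < max s.length t.length
    · rw [pvScan, pvAfrom]
      simp only [h, dif_pos, if_pos]
      -- the s-side step
      have hsstep : ∀ (tot : Int), (if hs : i < s.length then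
          (if '0' ≤ s[i] ∧ s[i] ≤ '9' then
            (if (if pref ≠ 0 then pref else pvD s t i) < 0 then tot + 1 else tot)
           else tot) else tot) = tot + (if i < s.length then pvSStep s t i else 0) := by
        intro tot
        by_cases hs : i < s.length
        · have hr : (if pref ≠ 0 then pref else pvD s t i) = pvCmpL (s.take i ++ s.drop (i+1)) t := by
            rw [pvCmpL_append_left]
            have hlen : (s.take i).length = i := by simp [Nat.le_of_lt hs]
            rw [hlen, ← hpref]
            by_cases hp : pref = 0
            · simp [hp, pvD_spec s t (s.length - i) i (by omega) (Or.inl hs)]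
            · simp [hp]
          have hlt : ((if pref ≠ 0 then pref else pvD s t i) < 0) ↔ (s.take i ++ s.drop (i+1)) < t := by
            rw [hr, pvCmpL_lt_iff]
            rcases pvCmpL_cases (s.take i ++ s.drop (i+1)) t with h' | h' | h' <;> rw [h'] <;> norm_num
          rw [dif_pos hs, if_pos hs]
          unfold pvSStep
          rw [List.getD_eq_getElem s ' ' hs]
          by_cases hd : '0' ≤ s[i] ∧ s[i] ≤ '9'
          · rw [if_pos hd, if_pos hd]
            by_cases hcc : (List.take i s ++ List.drop (i+1) s) < t
            · rw [if_pos (hlt.mpr hcc), if_pos hcc]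
            · rw [if_neg (fun hx => hcc (hlt.mp hx)), if_neg hcc]; ring
          · rw [if_neg hd, if_neg hd]; ring
        · simp [hs]
      -- the t-side step
      have htstep : ∀ (tot : Int), (if ht : i < t.length then
          (if '0' ≤ t[i] ∧ t[i] ≤ '9' then
            (if (if pref ≠ 0 then pref else pvE s t i) < 0 then tot + 1 else tot)
           else tot) else tot) = tot + (if i < t.length then pvTStep s t i else 0) := by
        intro tot
        by_cases ht : i < t.length
        · have hr : (if pref ≠ 0 then pref else pvE s t i) = pvCmpL s (t.take i ++ t.drop (i+1)) := by
            rw [pvCmpL_append_right]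
            have hlen : (t.take i).length = i := by simp [Nat.le_of_lt ht]
            rw [hlen, ← hpref]
            by_cases hp : pref = 0
            · simp [hp, pvE_spec s t (t.length - i) i (by omega) (Or.inl ht)]
            · simp [hp]
          have hlt : ((if pref ≠ 0 then pref else pvE s t i) < 0) ↔ s < (t.take i ++ t.drop (i+1)) := by
            rw [hr, pvCmpL_lt_iff]
            rcases pvCmpL_cases s (t.take i ++ t.drop (i+1)) with h' | h' | h' <;> rw [h'] <;> norm_num
          rw [dif_pos ht, if_pos ht]
          unfold pvTStep
          rw [List.getD_eq_getElem t ' ' ht]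
          by_cases hd : '0' ≤ t[i] ∧ t[i] ≤ '9'
          · rw [if_pos hd, if_pos hd]
            by_cases hcc : s < (List.take i t ++ List.drop (i+1) t)
            · rw [if_pos (hlt.mpr hcc), if_pos hcc]
            · rw [if_neg (fun hx => hcc (hlt.mp hx)), if_neg hcc]; ring
          · rw [if_neg hd, if_neg hd]; ring
        · simp [ht]
      rw [hsstep total, htstep (total + (if i < s.length then pvSStep s t i else 0))]
      rw [ih (i+1) _ _ (by omega) (by rw [pvCmpL_take_succ, ← hpref])]
      ring
    · rw [pvScan, pvAfrom]
      simp [h]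

theorem pvAfrom_sums (s t : List Char) : ∀ k i, max s.length t.length - i ≤ k →
    pvAfrom s t i = ((List.range' i (s.length - i)).map (pvSStep s t)).sum
      + ((List.range' i (t.length - i)).map (pvTStep s t)).sum := by
  intro k
  induction k with
  | zero =>
    intro i hk
    have h : ¬ i < max s.length t.length := by omega
    rw [pvAfrom]
    have h1 : s.length - i = 0 := by omega
    have h2 : t.length - i = 0 := by omega
    simp [h, h1, h2]
  | succ k ih =>
    intro i hk
    by_cases h : i < max s.length t.length
    · rw [pvAfrom]
      rw [if_pos h, ih (i+1) (by omega)]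
      have hs : (List.range' i (s.length - i)).map (pvSStep s t) =
          (if i < s.length then [pvSStep s t i] else []) ++ (List.range' (i+1) (s.length - (i+1))).map (pvSStep s t) := by
        by_cases hsl : i < s.length
        · have : s.length - i = (s.length - (i+1)) + 1 := by omega
          rw [this, List.range'_succ]
          simp [hsl]
        · have h1 : s.length - i = 0 := by omega
          have h2 : s.length - (i+1) = 0 := by omega
          simp [h1, h2, hsl]
      have ht : (List.range' i (t.length - i)).map (pvTStep s t) =
          (if i < t.length then [pvTStep s t i] else []) ++ (List.range' (i+1) (t.length - (i+1))).map (pvTStep s t) := by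
        by_cases htl : i < t.length
        · have : t.length - i = (t.length - (i+1)) + 1 := by omega
          rw [this, List.range'_succ]
          simp [htl]
        · have h1 : t.length - i = 0 := by omega
          have h2 : t.length - (i+1) = 0 := by omega
          simp [h1, h2, htl]
      rw [hs, ht]
      by_cases hsl : i < s.length <;> by_cases htl : i < t.length <;>
        simp [hsl, htl] <;> ring
    · rw [pvAfrom]
      have h1 : s.length - i = 0 := by omega
      have h2 : t.length - i = 0 := by omega
      simp [h, h1, h2]

-- A's fold over each string equals the corresponding sum of per-index contributions
theorem removeOneDigit_eq_sums (s t : String) :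
    removeOneDigit s t = ((List.range s.toList.length).map (pvSStep s.toList t.toList)).sum
      + ((List.range t.toList.length).map (pvTStep s.toList t.toList)).sum := by
  unfold removeOneDigit
  simp only [PySem.List.len_eq, PySem.List.pyRange_zero_natCast, List.foldl_map]
  have hbody : ∀ (u v : List Char), (fun (acc : Int) (k : Nat) =>
      if '0' ≤ PySem.List.pyGetD u (↑k) ' ' ∧ PySem.List.pyGetD u (↑k) ' ' ≤ '9' then
        (if PySem.List.slice u none (some ↑k) ++ PySem.List.slice u (some ((↑k)+1)) none < v
         then acc + 1 else acc)
      else acc) = fun acc k => acc + pvSStep u v k := by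
    intro u v
    funext acc k
    have hk1 : ((k : Int) + 1) = ((k+1 : Nat) : Int) := by push_cast; ring
    rw [hk1]
    simp only [PySem.List.pyGetD_natCast, PySem.List.slice_to_natCast, PySem.List.slice_from_natCast]
    unfold pvSStep
    split_ifs <;> ring
  have hbodyT : ∀ (u v : List Char), (fun (acc : Int) (k : Nat) =>
      if '0' ≤ PySem.List.pyGetD v (↑k) ' ' ∧ PySem.List.pyGetD v (↑k) ' ' ≤ '9' then
        (if u < PySem.List.slice v none (some ↑k) ++ PySem.List.slice v (some ((↑k)+1)) none
         then acc + 1 else acc)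
      else acc) = fun acc k => acc + pvTStep u v k := by
    intro u v
    funext acc k
    have hk1 : ((k : Int) + 1) = ((k+1 : Nat) : Int) := by push_cast; ring
    rw [hk1]
    simp only [PySem.List.pyGetD_natCast, PySem.List.slice_to_natCast, PySem.List.slice_from_natCast]
    unfold pvTStep
    split_ifs <;> ring
  rw [hbody s.toList t.toList, hbodyT s.toList t.toList,
    PySem.List.foldl_add, PySem.List.foldl_add]
  ring

-- ===== VERDICT (by name: the statement is the Claim_ definition above) =====
theorem removeOneDigit_spec : Claim_equal_removeOneDigit := by
  unfold Claim_equal_removeOneDigit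
  intro s t _
  unfold Spec_removeOneDigit
  rw [removeOneDigit_eq_sums]
  unfold removeOneDigit_alt
  rw [pvScan_spec s.toList t.toList (max s.toList.length t.toList.length) 0 0 0 (by omega)
    (by simp [pvCmpL])]
  rw [pvAfrom_sums s.toList t.toList (max s.toList.length t.toList.length) 0 (by omega)]
  simp [List.range_eq_range']
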